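-- pv_equiv track=rewrite | github.com/saajiidi/Order-Process-Automation | app_modules/utils.py | extract_best_zone
-- ===== SOURCE A (Python) =====
-- def extract_best_zone(address, KNOWN_ZONES):
--     """
--     Finds the best matching zone from the address.
--     Prioritizes longer matches (more specific) over shorter ones.
--     """
--     if not isinstance(address, str) or not address:
--         return ''
--
--     address_lower = address.lower()
--     matches = []
--
--     for zone in KNOWN_ZONES:
--         if zone.lower() in address_lower:
--             matches.append(zone)
--
--     if not matches:
--         return ''
--
--     # Sort matches by length (descending) to get most specific
--     matches.sort(key=len, reverse=True)
--     return matches[0]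
-- ===== SOURCE B (Python) =====
-- def extract_best_zone(address, KNOWN_ZONES):
--     """Single pass: keep the longest matching zone seen so far (strict > keeps the earliest tie)."""
--     if not isinstance(address, str) or not address:
--         return ''
--     address_lower = address.lower()
--     best, best_len = '', 0
--     for zone in KNOWN_ZONES:
--         if zone.lower() in address_lower and len(zone) > best_len:
--             best, best_len = zone, len(zone)
--     return best
-- ===== Notes on version B (the rewrite author's own statement) =====
-- stated objective: simpler
-- what changed: Replaces collect-all-matches-then-stable-sort-by-length with a single pass that keeps the first longest matching zone via a strict-> running maximum.
import Mathlib
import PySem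

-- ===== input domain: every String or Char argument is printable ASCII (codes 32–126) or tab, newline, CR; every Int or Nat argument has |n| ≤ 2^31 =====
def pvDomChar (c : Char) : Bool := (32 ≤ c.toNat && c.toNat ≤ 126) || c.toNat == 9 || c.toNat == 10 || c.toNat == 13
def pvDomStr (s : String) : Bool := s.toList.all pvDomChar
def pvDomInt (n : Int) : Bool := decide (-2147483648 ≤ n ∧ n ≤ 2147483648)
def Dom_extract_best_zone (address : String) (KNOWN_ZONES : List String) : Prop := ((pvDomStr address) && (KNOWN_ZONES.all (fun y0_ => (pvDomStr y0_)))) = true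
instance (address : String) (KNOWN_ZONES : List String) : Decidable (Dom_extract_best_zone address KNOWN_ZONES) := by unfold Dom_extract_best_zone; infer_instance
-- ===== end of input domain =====

-- B replaces A's collect-matched-then-stable-sort with a single strict-> running maximum; objective: simpler.

-- ===== PORT A =====
def extract_best_zone (address : String) (KNOWN_ZONES : List String) : String :=
  if address = "" then ""
  else
    let address_lower := PySem.Str.lower address
    let matched := KNOWN_ZONES.foldl
      (fun acc zone => if PySem.Str.isIn (PySem.Str.lower zone) address_lower then acc ++ [zone] else acc) []
    if matched = [] then ""
    else (PySem.List.sorted matched PySem.Str.len true).headD ""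

-- ===== PORT B =====
def extract_best_zone_alt (address : String) (KNOWN_ZONES : List String) : String :=
  if address = "" then ""
  else
    let address_lower := PySem.Str.lower address
    (KNOWN_ZONES.foldl
      (fun best zone =>
        if PySem.Str.isIn (PySem.Str.lower zone) address_lower && decide (best.2 < PySem.Str.len zone)
        then (zone, PySem.Str.len zone) else best)
      ("", (0 : Int))).1

-- ===== PRECONDITION & SPEC =====
def Spec_extract_best_zone (address : String) (KNOWN_ZONES : List String) (out : String) : Prop := out = extract_best_zone_alt address KNOWN_ZONES
instance (address : String) (KNOWN_ZONES : List String) (out : String) : Decidable (Spec_extract_best_zone address KNOWN_ZONES out) := by unfold Spec_extract_best_zone; infer_instance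

-- ===== CLAIM (what is proved, stated in full; the proofs are below) =====
def Claim_equal_extract_best_zone : Prop := ∀ (address : String) (KNOWN_ZONES : List String), Dom_extract_best_zone address KNOWN_ZONES → Spec_extract_best_zone address KNOWN_ZONES (extract_best_zone address KNOWN_ZONES)

-- ===== LEMMAS AND PROOFS =====

theorem pv_len_eq_zero {s : String} (h : PySem.Str.len s = 0) : s = "" := by
  simpa [PySem.Str.len] using h

-- head of inserting one element into the partially sorted (descending-by-len) accumulator
theorem pv_head_insertBy (z : String) (acc : List String) :
    (PySem.List.insertBy (fun a b => decide (PySem.Str.len b < PySem.Str.len a)) z acc).headD ""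
      = if PySem.Str.len (acc.headD "") < PySem.Str.len z then z else acc.headD "" := by
  cases acc with
  | nil =>
      simp only [PySem.List.insertBy, List.headD]
      by_cases h : PySem.Str.len ("" : String) < PySem.Str.len z
      · simp
      · have hz : PySem.Str.len z = 0 := by
          have := PySem.Str.len_eq z
          simp [PySem.Str.len] at h ⊢
          omega
        simp [pv_len_eq_zero hz]
  | cons y ys =>
      simp only [PySem.List.insertBy, List.headD, decide_eq_true_eq]
      split_ifs <;> rfl

-- core: head of the insertion-sort fold equals B's running-maximum fold
theorem pv_core (ms : List String) (acc : List String) :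
    (ms.foldl (fun a z => PySem.List.insertBy (fun a b => decide (PySem.Str.len b < PySem.Str.len a)) z a) acc).headD ""
      = (ms.foldl (fun (b : String × Int) z => if b.2 < PySem.Str.len z then (z, PySem.Str.len z) else b)
          (acc.headD "", PySem.Str.len (acc.headD ""))).1 := by
  induction ms generalizing acc with
  | nil => simp
  | cons z ms ih =>
      simp only [List.foldl_cons]
      rw [ih, pv_head_insertBy]
      congr 1
      split_ifs with h <;> rfl

-- ===== VERDICT (by name: the statement is the Claim_ definition above) =====
theorem extract_best_zone_spec : Claim_equal_extract_best_zone := by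
  intro address KNOWN_ZONES _
  unfold Spec_extract_best_zone extract_best_zone extract_best_zone_alt
  by_cases ha : address = ""
  · simp [ha]
  · simp only [ha, if_false]
    set al := PySem.Str.lower address
    set p : String → Bool := fun zone => PySem.Str.isIn (PySem.Str.lower zone) al with hp
    -- A's matched list is the filter of KNOWN_ZONES by p
    have hm : KNOWN_ZONES.foldl (fun acc zone => if p zone then acc ++ [zone] else acc) []
        = KNOWN_ZONES.filter p := by
      simpa using PySem.List.foldl_append_if p id KNOWN_ZONES []
    -- B's fold is the filtered fold of the running maximum
    have hb : (KNOWN_ZONES.foldl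
        (fun (best : String × Int) zone =>
          if p zone && decide (best.2 < PySem.Str.len zone) then (zone, PySem.Str.len zone) else best)
        ("", (0 : Int)))
        = ((KNOWN_ZONES.filter p).foldl
            (fun (b : String × Int) z => if b.2 < PySem.Str.len z then (z, PySem.Str.len z) else b)
            ("", (0 : Int))) := by
      rw [List.foldl_filter]
      congr 1
      funext b z
      by_cases h1 : p z = true
      · by_cases h2 : b.2 < PySem.Str.len z <;> simp [h1, h2]
      · simp [h1]
    rw [hm, hb]
    by_cases hf : KNOWN_ZONES.filter p = []
    · simp [hf]
    · simp only [hf, if_false]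
      have := pv_core (KNOWN_ZONES.filter p) []
      simp only [List.headD_nil] at this
      simpa [PySem.List.sorted, PySem.Str.len] using this
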